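-- pv_equiv track=rewrite | github.com/nobe0716/problem_solving | codeforces/contests/1433/A. Boring Apartments.py | solve
-- ===== SOURCE A (Python) =====
-- def solve(n):
--     base = [1, 11, 111, 1111]
--     aparts = []
--     for i in range(1, 10):
--         aparts += [_ * i for _ in base]
--     r = 0
--     for e in aparts:
--         r += len(str(e))
--         if e == n:
--             break
--     return r
-- ===== SOURCE B (Python) =====
-- def solve(n):
--     # Closed form: a repdigit d*rep(L) costs 10*(d-1) + L*(L+1)//2 keystrokes;
--     # anything that is not a valid apartment number costs the full 90.
--     if 1 <= n <= 9999:
--         for L in (1, 2, 3, 4):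
--             rep = (10 ** L - 1) // 9
--             if n % rep == 0 and n // rep <= 9:
--                 d = n // rep
--                 return 10 * (d - 1) + L * (L + 1) // 2
--     return 90
-- ===== Notes on version B (the rewrite author's own statement) =====
-- stated objective: simpler
-- what changed: Replaces building the 36-element apartment list and scanning it with a prefix-sum loop by a closed-form keystroke count 10*(d-1)+L*(L+1)//2 derived from the repdigit's digit d and length L (found by a 4-step divisibility check), returning 90 for non-apartment inputs.
import Mathlib
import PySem

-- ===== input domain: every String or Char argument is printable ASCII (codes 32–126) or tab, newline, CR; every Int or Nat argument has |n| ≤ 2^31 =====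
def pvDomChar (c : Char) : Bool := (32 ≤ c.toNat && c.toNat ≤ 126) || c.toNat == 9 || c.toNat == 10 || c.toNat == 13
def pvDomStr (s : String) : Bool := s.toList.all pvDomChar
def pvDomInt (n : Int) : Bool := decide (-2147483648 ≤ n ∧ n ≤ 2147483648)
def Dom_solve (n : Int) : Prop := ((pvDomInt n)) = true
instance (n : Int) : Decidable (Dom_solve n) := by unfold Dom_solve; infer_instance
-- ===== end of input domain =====

-- B replaces A's build-then-scan of the 36 apartment numbers by a closed-form
-- keystroke count from the repdigit's digit and length (objective: simpler).

-- ===== PORT A =====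
-- for e in aparts: r += len(str(e)); if e == n: break
def solveLoop (n : Int) : List Int → Int → Int
  | [], r => r
  | e :: rest, r =>
    let r' := r + (PySem.Str.len (PySem.Int.toStr e))
    if e = n then r' else solveLoop n rest r'

def solve (n : Int) : Int :=
  let base : List Int := [1, 11, 111, 1111]
  let aparts : List Int :=
    (PySem.List.pyRange 1 10 1).foldl (fun acc i => acc ++ base.map (fun x => x * i)) []
  solveLoop n aparts 0

-- ===== PORT B =====
-- for L in (1,2,3,4): rep = (10**L-1)//9; if n % rep == 0 and n // rep <= 9: return …
def altLoop (n : Int) : List Int → Int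
  | [] => 90
  | L :: rest =>
    let rep : Int := PySem.Int.floordiv (10 ^ L.toNat - 1) 9
    if PySem.Int.mod n rep = 0 ∧ PySem.Int.floordiv n rep ≤ 9 then
      let d := PySem.Int.floordiv n rep
      10 * (d - 1) + PySem.Int.floordiv (L * (L + 1)) 2
    else altLoop n rest

def solve_alt (n : Int) : Int :=
  if 1 ≤ n ∧ n ≤ 9999 then altLoop n [1, 2, 3, 4] else 90

-- ===== PRECONDITION & SPEC =====
def Spec_solve (n : Int) (out : Int) : Prop := out = solve_alt n
instance (n : Int) (out : Int) : Decidable (Spec_solve n out) := by unfold Spec_solve; infer_instance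

-- ===== CLAIM (what is proved, stated in full; the proofs are below) =====
def Claim_equal_solve : Prop := ∀ (n : Int), Dom_solve n → Spec_solve n (solve n)

-- ===== LEMMAS AND PROOFS =====

def apartsLit : List Int :=
  [1, 11, 111, 1111, 2, 22, 222, 2222, 3, 33, 333, 3333, 4, 44, 444, 4444,
   5, 55, 555, 5555, 6, 66, 666, 6666, 7, 77, 777, 7777, 8, 88, 888, 8888,
   9, 99, 999, 9999]

theorem solveLoop_not_mem (n : Int) (xs : List Int) (hn : n ∉ xs) (r : Int) :
    solveLoop n xs r = r + ((xs.map (fun e => PySem.Str.len (PySem.Int.toStr e))).sum) := by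
  induction xs generalizing r with
  | nil => simp [solveLoop]
  | cons e rest ih =>
    simp only [List.mem_cons, not_or] at hn
    simp only [solveLoop, List.map_cons, List.sum_cons]
    rw [if_neg (fun h => hn.1 h.symm), ih hn.2]
    ring

theorem altLoop_not_mem (n : Int) (h1 : 1 ≤ n) (hm : n ∉ apartsLit) :
    altLoop n [1, 2, 3, 4] = 90 := by
  have key : ∀ rep : Int, 0 < rep →
      PySem.Int.mod n rep = 0 → PySem.Int.floordiv n rep ≤ 9 →
      ∃ d : Int, 1 ≤ d ∧ d ≤ 9 ∧ n = rep * d := by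
    intro rep hrep hmod hd
    rw [PySem.Int.mod_eq_zero_iff_dvd] at hmod
    obtain ⟨d, hnd⟩ := hmod
    refine ⟨d, ?_, ?_, hnd⟩
    · nlinarith
    · rw [PySem.Int.floordiv_eq_ediv_of_pos hrep, hnd,
        Int.mul_ediv_cancel_left _ (by omega)] at hd
      exact hd
  simp only [altLoop]
  split_ifs with h1' h2 h3 h4
  · obtain ⟨d, hd1, hd9, hnd⟩ := key 1 (by norm_num) (by exact_mod_cast h1'.1) (by exact_mod_cast h1'.2)
    exfalso; apply hm; interval_cases d <;> simp_all [apartsLit]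
  · obtain ⟨d, hd1, hd9, hnd⟩ := key 11 (by norm_num) (by exact_mod_cast h2.1) (by exact_mod_cast h2.2)
    exfalso; apply hm; interval_cases d <;> simp_all [apartsLit]
  · obtain ⟨d, hd1, hd9, hnd⟩ := key 111 (by norm_num) (by exact_mod_cast h3.1) (by exact_mod_cast h3.2)
    exfalso; apply hm; interval_cases d <;> simp_all [apartsLit]
  · obtain ⟨d, hd1, hd9, hnd⟩ := key 1111 (by norm_num) (by exact_mod_cast h4.1) (by exact_mod_cast h4.2)
    exfalso; apply hm; interval_cases d <;> simp_all [apartsLit]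
  · rfl

-- ===== VERDICT (by name: the statement is the Claim_ definition above) =====
theorem solve_spec : Claim_equal_solve := by
  intro n _
  unfold Spec_solve
  by_cases hm : n ∈ apartsLit
  · fin_cases hm <;> decide
  · have hA : solve n = 90 := by
      have h0 : solve n = solveLoop n apartsLit 0 := rfl
      rw [h0, solveLoop_not_mem n apartsLit hm 0]
      decide
    have hB : solve_alt n = 90 := by
      unfold solve_alt
      split_ifs with hr
      · exact altLoop_not_mem n hr.1 hm
      · rfl
    rw [hA, hB]
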